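-- pv_equiv track=rewrite | github.com/HeoSeokYong/AlgorithmStudy | Math/n_poker.py | solution
-- ===== SOURCE A (Python) =====
-- MOD = 10007
--
-- def solution(N:int) -> int:
--     result = 0
--     combs = [[0 for _ in range(53)] for _ in range(53)]
--
--     for i in range(53):
--         combs[i][0] = combs[i][i] = 1
--         for j in range(1, i):
--             combs[i][j] = (combs[i-1][j-1] + combs[i-1][j]) % MOD
--             combs[i][i-j] = combs[i][j]
--
--     for x in range(4, N+1, 4):
--         if (x//4) % 2:
--             result += combs[13][x//4] * combs[52-x][N-x]
--         else:
--             result -= combs[13][x//4] * combs[52-x][N-x]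
--
--         result %= MOD
--
--     return result
-- ===== SOURCE B (Python) =====
-- MOD = 10007
--
-- def _binom(n, k):
--     if k < 0 or k > n:
--         return 0
--     b = 1
--     for i in range(min(k, n - k)):
--         b = b * (n - i) // (i + 1)
--     return b
--
-- def solution(N: int) -> int:
--     # Complementary counting: #hands with at least one complete rank quad
--     # = C(52, N) - [z^N] ((1+z)^4 - z^4)^13, the polynomial counting
--     # hands that take at most 3 cards of every rank.
--     f = [1]
--     for _ in range(13):
--         g = [0] * (len(f) + 3)
--         for i, v in enumerate(f):
--             for c, w in ((0, 1), (1, 4), (2, 6), (3, 4)):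
--                 g[i + c] += v * w
--         f = g
--     total = _binom(52, N) if 0 <= N <= 52 else 0
--     no_quad = f[N] if 0 <= N < len(f) else 0
--     return (total - no_quad) % MOD
-- ===== Notes on version B (the rewrite author's own statement) =====
-- stated objective: alternative
-- what changed: Replaces A's inclusion-exclusion sum over quad counts (with a precomputed 53x53 Pascal table) by complementary counting: B builds the rank polynomial ((1+z)^4 - z^4)^13 by a 13-round coefficient DP to count quad-free hands, and subtracts it from C(52,N) computed by the multiplicative formula.
-- outside the precondition, e.g. on solution(57): A raises IndexError, B returns 0
import Mathlib
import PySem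

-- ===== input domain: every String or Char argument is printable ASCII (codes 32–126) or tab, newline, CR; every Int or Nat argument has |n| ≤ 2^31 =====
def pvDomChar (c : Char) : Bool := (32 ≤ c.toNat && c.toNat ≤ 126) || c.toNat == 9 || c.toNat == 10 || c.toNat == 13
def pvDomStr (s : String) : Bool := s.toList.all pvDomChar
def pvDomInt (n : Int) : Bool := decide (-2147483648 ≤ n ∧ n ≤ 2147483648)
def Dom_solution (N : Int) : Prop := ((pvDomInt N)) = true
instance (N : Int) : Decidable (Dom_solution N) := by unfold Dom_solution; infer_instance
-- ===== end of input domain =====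

-- B replaces A's inclusion-exclusion over quad counts (Pascal-table based) with
-- complementary counting via the rank polynomial ((1+z)^4 - z^4)^13 (objective: alternative).

-- ===== PORT A =====
-- inner loop 'for j in range(1, i)': fills row i symmetrically from row i-1
def pascalInner (row prev : List Int) (i : Nat) : List Int :=
  (List.range' 1 (i - 1)).foldl (fun r j =>
    let v := PySem.Int.mod (prev.getD (j - 1) 0 + prev.getD j 0) 10007
    (r.set j v).set (i - j) v) row

-- one iteration of 'for i in range(53)'
def pascalStep (table : List (List Int)) (i : Nat) : List (List Int) :=
  let row0 := ((table.getD i []).set 0 1).set i 1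
  let prev := table.getD (i - 1) []
  table.set i (pascalInner row0 prev i)

def solution (N : Int) : Int :=
  let combs := (List.range 53).foldl pascalStep
                 (List.replicate 53 (List.replicate 53 (0 : Int)))
  (PySem.List.pyRange 4 (N + 1) 4).foldl (fun result x =>
    let k := PySem.Int.floordiv x 4
    let c1 := PySem.List.pyGetD (PySem.List.pyGetD combs 13 []) k 0
    let c2 := PySem.List.pyGetD (PySem.List.pyGetD combs (52 - x) []) (N - x) 0
    let result' := if PySem.Int.mod k 2 ≠ 0 then result + c1 * c2 else result - c1 * c2
    PySem.Int.mod result' 10007) 0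

-- ===== PORT B =====
-- _binom: Python's multiplicative-formula loop (exact at every step: b*(n-i) is divisible by i+1)
def bBinom (n k : Int) : Int :=
  if k < 0 ∨ k > n then 0
  else (List.range (min k (n - k)).toNat).foldl (fun b i =>
    PySem.Int.floordiv (b * (n - (i : Int))) ((i : Int) + 1)) 1

-- one round of the coefficient DP: multiply f by (1 + 4z + 6z^2 + 4z^3)
def bStep (f : List Int) : List Int :=
  f.zipIdx.foldl (fun g (p : Int × Nat) =>
    [(0, (1 : Int)), (1, 4), (2, 6), (3, 4)].foldl (fun g (cw : Nat × Int) =>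
      g.set (p.2 + cw.1) (g.getD (p.2 + cw.1) 0 + p.1 * cw.2)) g)
    (List.replicate (f.length + 3) 0)

def solution_alt (N : Int) : Int :=
  let f := (List.range 13).foldl (fun f _ => bStep f) [1]
  let total := if 0 ≤ N ∧ N ≤ 52 then bBinom 52 N else 0
  let no_quad := if 0 ≤ N ∧ N < (f.length : Int) then f.getD N.toNat 0 else 0
  PySem.Int.mod (total - no_quad) 10007

-- ===== PRECONDITION & SPEC =====
-- A raises IndexError (row index N-4 ≥ 53 on the first loop iteration) for every N ≥ 57;
-- Pre_ excludes exactly those inputs.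
def Pre_solution (N : Int) : Prop := N ≤ 56
instance (N : Int) : Decidable (Pre_solution N) := by unfold Pre_solution; infer_instance
def pvWitness_solution : Int := 13

def Spec_solution (N : Int) (out : Int) : Prop := out = solution_alt N
instance (N : Int) (out : Int) : Decidable (Spec_solution N out) := by unfold Spec_solution; infer_instance

-- ===== CLAIM (what is proved, stated in full; the proofs are below) =====
def Claim_equal_solution : Prop := ∀ (N : Int), Dom_solution N → Pre_solution N → Spec_solution N (solution N)

-- ===== LEMMAS AND PROOFS =====

-- for N < 0 both sides give 0: A's loop is empty, B's branches both take 0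
lemma solution_neg (N : Int) (h : N < 0) : solution N = 0 := by
  unfold solution
  rw [show PySem.List.pyRange 4 (N + 1) 4 = [] from
    List.eq_nil_iff_forall_not_mem.mpr (fun x hx => by
      rw [PySem.List.mem_pyRange_iff_of_pos (by norm_num)] at hx; omega)]
  rfl

set_option maxRecDepth 1000000 in
lemma solution_alt_neg (N : Int) (h : N < 0) : solution_alt N = 0 := by
  have h0 : ¬ (0 ≤ N) := by omega
  simp [solution_alt, h0, PySem.Int.mod]

-- the 57 inputs 0 ≤ N ≤ 56, checked by kernel evaluation of both ports
set_option maxRecDepth 1000000 in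
lemma solution_table :
    ((List.range 57).all (fun n => solution n == solution_alt n)) = true := by decide

lemma solution_mid (N : Int) (h0 : 0 ≤ N) (h1 : N ≤ 56) : solution N = solution_alt N := by
  have hlt : N.toNat < 57 := by omega
  have h := List.all_eq_true.mp solution_table N.toNat (List.mem_range.mpr hlt)
  rw [beq_iff_eq] at h
  have hN : N = ((N.toNat : Nat) : Int) := by omega
  rw [hN]; exact h

-- ===== VERDICT (by name: the statement is the Claim_ definition above) =====
theorem solution_spec : Claim_equal_solution := by
  intro N _ hpre
  unfold Spec_solution
  by_cases h : N < 0
  · rw [solution_neg N h, solution_alt_neg N h]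
  · exact solution_mid N (by omega) hpre
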